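-- pv_equiv track=rewrite | github.com/matuszsmig/algorithms-and-data-structures | blok1/kolowium1/kol2latatemu/zad1.py | prityjnosc
-- ===== SOURCE A (Python) =====
-- def prityjnosc(liczba):
--     tab = [0 for _ in range(10)]
--     while liczba>0:
--         if tab[liczba%10]<2:
--             tab[liczba%10]+=1
--         liczba//=10
--     maxx = max(tab)
--     if maxx==1:
--         return 0
--     sum = 0
--     for i in range(len(tab)):
--         if tab[i]==maxx:
--             sum+=1
--     return sum
-- ===== SOURCE B (Python) =====
-- def prityjnosc(liczba):
--     seen = set()
--     dup = set()
--     n = liczba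
--     while n > 0:
--         d = n % 10
--         if d in seen:
--             dup.add(d)
--         seen.add(d)
--         n //= 10
--     return len(dup)
-- ===== Notes on version B (the rewrite author's own statement) =====
-- stated objective: simpler
-- what changed: B makes a single pass over the digits maintaining two sets (seen, dup) and returns len(dup), eliminating A's capped 10-slot tally, its max() pass and its count-equal-to-max pass.
-- intended difference: For liczba <= 0 A returns 10 (the max of the all-zero tally matches all ten slots); B returns 0, the intended duplicate-digit count for a number with no digits. — e.g. on prityjnosc(0): A returns 10, B returns 0
import Mathlib
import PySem

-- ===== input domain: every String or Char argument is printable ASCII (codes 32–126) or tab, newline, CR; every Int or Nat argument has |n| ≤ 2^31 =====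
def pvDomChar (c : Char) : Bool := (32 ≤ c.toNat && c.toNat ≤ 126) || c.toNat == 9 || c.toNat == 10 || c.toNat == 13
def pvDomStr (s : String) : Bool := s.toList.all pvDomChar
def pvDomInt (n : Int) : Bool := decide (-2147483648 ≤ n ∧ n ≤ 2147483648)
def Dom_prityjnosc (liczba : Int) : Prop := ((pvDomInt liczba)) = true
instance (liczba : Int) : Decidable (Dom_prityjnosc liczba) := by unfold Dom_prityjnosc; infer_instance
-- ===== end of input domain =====

-- B makes a single pass over the digits maintaining two sets (seen, dup) and returns len(dup),
-- eliminating A's capped 10-slot tally, its max() pass and its count-equal-to-max pass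
-- (objective: simpler); on liczba ≤ 0 B returns 0 where A returns 10 (see D_prityjnosc).

-- ===== PORT A =====
-- the 'while liczba>0' loop of A, carrying the capped tally list 'tab'
def pvLoopA (liczba : Int) (tab : List Int) : List Int :=
  if _h : 0 < liczba then
    pvLoopA (PySem.Int.floordiv liczba 10)
      (if PySem.List.pyGetD tab (PySem.Int.mod liczba 10) 0 < 2 then
        PySem.List.pySetD tab (PySem.Int.mod liczba 10)
          (PySem.List.pyGetD tab (PySem.Int.mod liczba 10) 0 + 1)
       else tab)
  else tab
termination_by liczba.toNat
decreasing_by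
  rw [PySem.Int.floordiv_eq_ediv_of_pos (by omega : (0:Int) < 10)]
  omega

def prityjnosc (liczba : Int) : Int :=
  let tab := pvLoopA liczba (List.replicate 10 0)
  let maxx := match PySem.List.max? tab (fun x => x) with
    | some m => m
    | none => 0   -- unreachable: tab always has 10 entries
  if maxx == 1 then 0
  else
    (PySem.List.pyRange 0 (tab.length : Int) 1).foldl
      (fun s i => if PySem.List.pyGetD tab i 0 == maxx then s + 1 else s) 0

-- ===== PORT B =====
-- the 'while n>0' loop of B, carrying the two sets 'seen' and 'dup'
def pvLoopB (n : Int) (seen dup : PySem.Set Int) : PySem.Set Int × PySem.Set Int :=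
  if _h : 0 < n then
    pvLoopB (PySem.Int.floordiv n 10)
      (PySem.Set.add seen (PySem.Int.mod n 10))
      (if PySem.Set.contains seen (PySem.Int.mod n 10) then
        PySem.Set.add dup (PySem.Int.mod n 10)
       else dup)
  else (seen, dup)
termination_by n.toNat
decreasing_by
  rw [PySem.Int.floordiv_eq_ediv_of_pos (by omega : (0:Int) < 10)]
  omega

def prityjnosc_alt (liczba : Int) : Int :=
  ((pvLoopB liczba PySem.Set.empty PySem.Set.empty).2.length : Int)

-- ===== PRECONDITION & SPEC =====
-- For liczba ≤ 0 A returns 10 (the max of the all-zero tally matches all ten slots);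
-- B returns 0, the intended duplicate-digit count for a number with no digits.
def D_prityjnosc (liczba : Int) : Prop := liczba ≤ 0
instance (liczba : Int) : Decidable (D_prityjnosc liczba) := by unfold D_prityjnosc; infer_instance

def Spec_prityjnosc (liczba : Int) (out : Int) : Prop := ¬ D_prityjnosc liczba → out = prityjnosc_alt liczba
instance (liczba : Int) (out : Int) : Decidable (Spec_prityjnosc liczba out) := by unfold Spec_prityjnosc; infer_instance

def pvDiffWitness_prityjnosc : Int := 0
def pvDiffWitnessOut_prityjnosc : Int × Int := (10, 0)

-- ===== CLAIM (what is proved, stated in full; the proofs are below) =====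
def Claim_unchanged_prityjnosc : Prop := ∀ (liczba : Int), Dom_prityjnosc liczba → Spec_prityjnosc liczba (prityjnosc liczba)
def Claim_changed_prityjnosc : Prop := Dom_prityjnosc (pvDiffWitness_prityjnosc) ∧ D_prityjnosc (pvDiffWitness_prityjnosc) ∧ prityjnosc (pvDiffWitness_prityjnosc) = pvDiffWitnessOut_prityjnosc.1 ∧ prityjnosc_alt (pvDiffWitness_prityjnosc) = pvDiffWitnessOut_prityjnosc.2 ∧ pvDiffWitnessOut_prityjnosc.1 ≠ pvDiffWitnessOut_prityjnosc.2
def Claim_exact_prityjnosc : Prop := ∀ (liczba : Int), Dom_prityjnosc liczba → D_prityjnosc liczba → prityjnosc liczba ≠ prityjnosc_alt liczba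

-- ===== LEMMAS AND PROOFS =====

theorem mod10_bounds (n : Int) : 0 ≤ PySem.Int.mod n 10 ∧ PySem.Int.mod n 10 < 10 := by
  rw [PySem.Int.mod_eq_emod_of_pos (by omega : (0:Int) < 10)]
  exact ⟨Int.emod_nonneg n (by omega), Int.emod_lt_of_pos n (by omega)⟩

-- the plain digit list of n (least significant first), used only by the proofs
def pvDigits (n : Int) : List Int :=
  if _h : 0 < n then PySem.Int.mod n 10 :: pvDigits (PySem.Int.floordiv n 10) else []
termination_by n.toNat
decreasing_by
  rw [PySem.Int.floordiv_eq_ediv_of_pos (by omega : (0:Int) < 10)]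
  omega

theorem pvDigits_cons (n : Int) (h : 0 < n) :
    pvDigits n = PySem.Int.mod n 10 :: pvDigits (PySem.Int.floordiv n 10) := by
  rw [pvDigits.eq_def, dif_pos h]

theorem pvDigits_nil (n : Int) (h : ¬ 0 < n) : pvDigits n = [] := by
  rw [pvDigits.eq_def, dif_neg h]

theorem mem_pvDigits : ∀ (k : Nat) (n : Int), n.toNat ≤ k →
    ∀ x ∈ pvDigits n, 0 ≤ x ∧ x < 10 := by
  intro k
  induction k with
  | zero =>
    intro n hn x hx
    rw [pvDigits_nil n (by omega)] at hx
    simp at hx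
  | succ k ih =>
    intro n hn x hx
    by_cases h : 0 < n
    · rw [pvDigits_cons n h] at hx
      rcases List.mem_cons.mp hx with rfl | hx'
      · exact mod10_bounds n
      · exact ih _ (by rw [PySem.Int.floordiv_eq_ediv_of_pos (by omega : (0:Int) < 10)]; omega) x hx'
    · rw [pvDigits_nil n h] at hx
      simp at hx

theorem loopA_inv : ∀ (k : Nat) (n : Int), n.toNat ≤ k → ∀ tab : List Int,
    tab.length = 10 →
    (∀ j : Nat, j < 10 → 0 ≤ tab.getD j 0 ∧ tab.getD j 0 ≤ 2) →
    (pvLoopA n tab).length = 10 ∧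
      ∀ j : Nat, j < 10 →
        (pvLoopA n tab).getD j 0
          = min 2 (tab.getD j 0 + (((pvDigits n).count ((j : Int))) : Int)) := by
  intro k
  induction k with
  | zero =>
    intro n hn tab hlen hb
    have h : ¬ 0 < n := by omega
    rw [pvLoopA.eq_def, dif_neg h, pvDigits_nil n h]
    refine ⟨hlen, ?_⟩
    intro j hj
    have := hb j hj
    simp only [List.count_nil, Nat.cast_zero, add_zero]
    omega
  | succ k ih =>
    intro n hn tab hlen hb
    by_cases h : 0 < n
    · have hm := mod10_bounds n
      have hn' : (PySem.Int.floordiv n 10).toNat ≤ k := by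
        rw [PySem.Int.floordiv_eq_ediv_of_pos (by omega : (0:Int) < 10)]
        omega
      set d : Int := PySem.Int.mod n 10 with hd
      set j0 : Nat := d.toNat with hj0def
      have hdj : d = (j0 : Int) := by omega
      have hj0 : j0 < 10 := by omega
      have hgetd : PySem.List.pyGetD tab d 0 = tab.getD j0 0 := by
        rw [hdj, PySem.List.pyGetD_natCast]
      set tab' : List Int :=
        (if PySem.List.pyGetD tab d 0 < 2 then
          PySem.List.pySetD tab d (PySem.List.pyGetD tab d 0 + 1) else tab) with htab'
      have hb0 := hb j0 hj0
      have hlen' : tab'.length = 10 := by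
        rw [htab']
        split
        · rw [PySem.List.pySetD_of_nonneg tab _ (by omega)]
          simp [hlen]
        · exact hlen
      have hget' : ∀ j : Nat, j < 10 →
          tab'.getD j 0 = if j = j0 then min 2 (tab.getD j0 0 + 1) else tab.getD j 0 := by
        intro j hj
        rw [htab']
        by_cases hc : PySem.List.pyGetD tab d 0 < 2
        · rw [if_pos hc, PySem.List.pySetD_of_nonneg tab _ (by omega)]
          have hjlen : j < (tab.set d.toNat (PySem.List.pyGetD tab d 0 + 1)).length := by
            simp [hlen]; omega
          rw [List.getD_eq_getElem _ _ hjlen, List.getElem_set]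
          rw [hgetd] at hc
          by_cases hjj : d.toNat = j
          · have hjeq : j = j0 := by omega
            rw [if_pos hjj, if_pos hjeq, hgetd]
            have hjj0 : tab.getD j0 0 < 2 := hc
            omega
          · have hjne : ¬ (j = j0) := by omega
            rw [if_neg hjj, if_neg hjne, List.getD_eq_getElem _ _ (by omega : j < tab.length)]
        · rw [if_neg hc]
          rw [hgetd] at hc
          by_cases hjj : j = j0
          · subst hjj
            rw [if_pos rfl]
            omega
          · rw [if_neg hjj]
      have hb' : ∀ j : Nat, j < 10 → 0 ≤ tab'.getD j 0 ∧ tab'.getD j 0 ≤ 2 := by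
        intro j hj
        rw [hget' j hj]
        split
        · omega
        · exact hb j hj
      obtain ⟨ihlen, ihget⟩ := ih (PySem.Int.floordiv n 10) hn' tab' hlen' hb'
      rw [pvLoopA.eq_def, dif_pos h, ← htab']
      refine ⟨ihlen, ?_⟩
      intro j hj
      rw [ihget j hj, hget' j hj, pvDigits_cons n h]
      have hdj0 : PySem.Int.mod n 10 = (j0 : Int) := by rw [← hd, hdj]
      rw [hdj0, List.count_cons]
      by_cases hjj : j = j0
      · subst hjj
        simp only [beq_self_eq_true, if_pos]
        push_cast
        omega
      · have : ¬ (((j0 : Int)) == ((j : Int))) = true := by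
          simp only [beq_iff_eq]
          intro hcon
          exact hjj (by exact_mod_cast hcon.symm)
        rw [if_neg this, if_neg hjj]
        simp
    · rw [pvLoopA.eq_def, dif_neg h, pvDigits_nil n h]
      refine ⟨hlen, ?_⟩
      intro j hj
      have := hb j hj
      simp only [List.count_nil, Nat.cast_zero, add_zero]
      omega

-- B's loop: the final 'dup' set holds exactly the digits that repeat (relative to the inherited state)
theorem loopB_inv : ∀ (k : Nat) (n : Int), n.toNat ≤ k → ∀ seen dup : PySem.Set Int,
    seen.Nodup → dup.Nodup →
    (pvLoopB n seen dup).2.Nodup ∧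
      ∀ x : Int, x ∈ (pvLoopB n seen dup).2 ↔
        x ∈ dup ∨ (x ∈ pvDigits n ∧ (x ∈ seen ∨ 2 ≤ (pvDigits n).count x)) := by
  intro k
  induction k with
  | zero =>
    intro n hn seen dup hs hd
    have h : ¬ 0 < n := by omega
    rw [pvLoopB.eq_def, dif_neg h, pvDigits_nil n h]
    refine ⟨hd, ?_⟩
    intro x
    simp
  | succ k ih =>
    intro n hn seen dup hs hd
    by_cases h : 0 < n
    · have hn' : (PySem.Int.floordiv n 10).toNat ≤ k := by
        rw [PySem.Int.floordiv_eq_ediv_of_pos (by omega : (0:Int) < 10)]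
        omega
      set d : Int := PySem.Int.mod n 10 with hdd
      set seen' := PySem.Set.add seen d with hseen'
      set dup' := (if PySem.Set.contains seen d then PySem.Set.add dup d else dup) with hdup'
      have hs' : seen'.Nodup := PySem.Set.nodup_add _ _ hs
      have hd' : dup'.Nodup := by
        rw [hdup']
        split
        · exact PySem.Set.nodup_add _ _ hd
        · exact hd
      obtain ⟨ihnd, ihmem⟩ := ih (PySem.Int.floordiv n 10) hn' seen' dup' hs' hd'
      rw [pvLoopB.eq_def, dif_pos h]
      refine ⟨ihnd, ?_⟩
      intro x
      rw [ihmem x, pvDigits_cons n h, ← hdd]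
      have hmemdup' : x ∈ dup' ↔ x ∈ dup ∨ (d ∈ seen ∧ x = d) := by
        rw [hdup']
        by_cases hc : d ∈ seen
        · rw [if_pos ((PySem.Set.contains_iff seen d).mpr hc), PySem.Set.mem_add]
          tauto
        · rw [if_neg (by simpa [PySem.Set.contains_iff] using hc)]
          tauto
      have hmemseen' : x ∈ seen' ↔ x ∈ seen ∨ x = d := PySem.Set.mem_add _ _ _
      rw [hmemdup', hmemseen', List.count_cons, List.mem_cons]
      have hcm : x ∈ pvDigits (PySem.Int.floordiv n 10) ↔
          0 < List.count x (pvDigits (PySem.Int.floordiv n 10)) := List.count_pos_iff.symm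
      by_cases hx : x = d
      · have hbt : (d == x) = true := by simp [hx]
        rw [hcm, if_pos hbt, hx]
        generalize List.count d (pvDigits (PySem.Int.floordiv n 10)) = c
        by_cases h1 : d ∈ dup <;> by_cases h2 : d ∈ seen <;> (simp [h1, h2]; try omega)
      · have hbf : ¬ ((d == x) = true) := by
          simp only [beq_iff_eq]
          intro hcon
          exact hx hcon.symm
        rw [if_neg hbf, add_zero]
        tauto
    · rw [pvLoopB.eq_def, dif_neg h, pvDigits_nil n h]
      refine ⟨hd, ?_⟩
      intro x
      simp

theorem A_nonpos (liczba : Int) (h : ¬ 0 < liczba) : prityjnosc liczba = 10 := by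
  unfold prityjnosc
  rw [pvLoopA.eq_def, dif_neg h]
  decide

theorem B_nonpos (liczba : Int) (h : ¬ 0 < liczba) : prityjnosc_alt liczba = 0 := by
  unfold prityjnosc_alt
  rw [pvLoopB.eq_def, dif_neg h]
  decide

-- ===== VERDICT (by name: the statements are the Claim_ definitions above) =====
theorem prityjnosc_spec : Claim_unchanged_prityjnosc := by
  intro liczba _
  unfold Spec_prityjnosc D_prityjnosc
  intro hnD
  have hpos : 0 < liczba := by omega
  simp only [prityjnosc, prityjnosc_alt]
  have hrep : ∀ j : Nat, j < 10 → ((List.replicate 10 (0:Int)).getD j 0) = 0 := by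
    intro j hj
    exact List.getD_replicate 0 hj
  obtain ⟨hlen, hget⟩ := loopA_inv liczba.toNat liczba le_rfl (List.replicate 10 0)
    (by simp) (by intro j hj; rw [hrep j hj]; omega)
  set digits := pvDigits liczba with hdig
  set tab := pvLoopA liczba (List.replicate 10 0) with htabdef
  obtain ⟨hSnd, hSmem⟩ := loopB_inv liczba.toNat liczba le_rfl
    PySem.Set.empty PySem.Set.empty List.nodup_nil List.nodup_nil
  set S := (pvLoopB liczba PySem.Set.empty PySem.Set.empty).2 with hSdef
  have hSmem' : ∀ x : Int, x ∈ S ↔ x ∈ digits ∧ 2 ≤ digits.count x := by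
    intro x
    rw [hSmem x]
    simp [PySem.Set.empty, hdig]
  have hget2 : ∀ j : Nat, j < 10 → tab.getD j 0 = min 2 ((digits.count ((j:Int)) : Int)) := by
    intro j hj
    have h1 := hget j hj
    rw [hrep j hj] at h1
    simpa using h1
  have htabmap : tab = (List.range 10).map (fun j : Nat => min 2 ((digits.count ((j:Int)) : Int))) := by
    apply List.ext_getElem (by simp [hlen])
    intro i h1 h2
    have h10 : i < 10 := by rw [hlen] at h1; exact h1
    have h3 := hget2 i h10
    rw [List.getD_eq_getElem _ _ h1] at h3
    rw [h3]
    simp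
  have hmem : ∀ x : Int, x ∈ tab ↔
      ∃ j : Nat, j < 10 ∧ min 2 ((digits.count ((j:Int)) : Int)) = x := by
    intro x
    rw [htabmap]
    simp
  have hne : tab ≠ [] := by
    intro hc
    rw [hc] at hlen
    simp at hlen
  obtain ⟨m, hmax⟩ : ∃ m, PySem.List.max? tab (fun x => x) = some m := by
    cases hcase : PySem.List.max? tab (fun x => x) with
    | none => exact absurd ((PySem.List.max?_eq_none_iff tab _).mp hcase) hne
    | some m => exact ⟨m, rfl⟩
  have hmmem : m ∈ tab := PySem.List.max?_mem hmax
  have hmub : ∀ y ∈ tab, y ≤ m := fun y hy => PySem.List.max?_isMax hmax y hy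
  have hmx : (match PySem.List.max? tab (fun x => x) with
      | some m => m
      | none => (0:Int)) = m := by rw [hmax]
  rw [hmx]
  have hfold : ∀ mv : Int,
      (PySem.List.pyRange 0 ((tab.length : Int)) 1).foldl
        (fun s i => if PySem.List.pyGetD tab i 0 == mv then s + 1 else s) 0
        = (List.count mv tab : Int) := by
    intro mv
    rw [PySem.List.foldl_pyRange_zero_pyGetD' tab 0 (fun s x => if x == mv then s + 1 else s) 0]
    rw [PySem.List.foldl_beq_add_one]
    simp
  set N2 := List.countP (fun j : Nat => decide (2 ≤ List.count ((j:Int)) digits)) (List.range 10) with hN2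
  have hSlen : S.length = N2 := by
    have hnd2 : (((List.range 10).filter
        (fun j : Nat => decide (2 ≤ List.count ((j:Int)) digits))).map (fun j : Nat => (j : Int))).Nodup := by
      apply List.Nodup.map
      · intro a b hab
        simp at hab
        exact hab
      · exact List.Nodup.filter _ List.nodup_range
    have hmemiff : ∀ x : Int, x ∈ S ↔ x ∈ (((List.range 10).filter
        (fun j : Nat => decide (2 ≤ List.count ((j:Int)) digits))).map (fun j : Nat => (j : Int))) := by
      intro x
      rw [hSmem' x]
      simp only [List.mem_map, List.mem_filter, List.mem_range, decide_eq_true_eq]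
      constructor
      · rintro ⟨hxd, hc⟩
        have hbnd := mem_pvDigits liczba.toNat liczba le_rfl x (hdig ▸ hxd)
        refine ⟨x.toNat, ⟨by omega, ?_⟩, Int.toNat_of_nonneg hbnd.1⟩
        rw [Int.toNat_of_nonneg hbnd.1]
        exact hc
      · rintro ⟨j, ⟨hj10, hc⟩, rfl⟩
        exact ⟨List.count_pos_iff.mp (by omega), hc⟩
    have hperm := (List.perm_ext_iff_of_nodup hSnd hnd2).mpr hmemiff
    have hlq := hperm.length_eq
    rw [List.length_map, ← List.countP_eq_length_filter] at hlq
    exact hlq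
  by_cases hdup : ∃ j : Nat, j < 10 ∧ 2 ≤ List.count ((j:Int)) digits
  · obtain ⟨j2, hj2, hc2⟩ := hdup
    have h2mem : (2:Int) ∈ tab := (hmem 2).mpr ⟨j2, hj2, by omega⟩
    have hm2 : m = 2 := by
      obtain ⟨j, hj, hjeq⟩ := (hmem m).mp hmmem
      have := hmub 2 h2mem
      omega
    subst hm2
    rw [if_neg (by decide : ¬ (((2:Int) == 1) = true))]
    rw [hfold 2]
    have hcnt2 : List.count (2:Int) tab = N2 := by
      rw [htabmap, List.count_eq_countP, List.countP_map, hN2]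
      apply List.countP_congr
      intro j hj
      simp only [List.mem_range] at hj
      simp only [Function.comp_apply, beq_iff_eq, decide_eq_true_eq]
      omega
    rw [hcnt2, hSlen]
  · push Not at hdup
    have hN2z : N2 = 0 := by
      rw [hN2]
      apply List.countP_eq_zero.mpr
      intro j hj
      simp only [List.mem_range] at hj
      simp only [decide_eq_true_eq]
      have := hdup j hj
      omega
    have hub1 : ∀ y ∈ tab, y ≤ 1 := by
      intro y hy
      obtain ⟨j, hj, hjeq⟩ := (hmem y).mp hy
      have := hdup j hj
      omega
    have hdcons := pvDigits_cons liczba hpos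
    have hx0mem : PySem.Int.mod liczba 10 ∈ digits := by
      rw [hdig, hdcons]
      exact List.mem_cons_self
    have hxb := mem_pvDigits liczba.toNat liczba le_rfl _ (hdig ▸ hx0mem)
    have h1mem : (1:Int) ∈ tab := by
      have hcx : 1 ≤ List.count (PySem.Int.mod liczba 10) digits :=
        List.count_pos_iff.mpr hx0mem
      have hcx2 := hdup (PySem.Int.mod liczba 10).toNat (by omega)
      rw [Int.toNat_of_nonneg hxb.1] at hcx2
      refine (hmem 1).mpr ⟨(PySem.Int.mod liczba 10).toNat, by omega, ?_⟩
      rw [Int.toNat_of_nonneg hxb.1]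
      omega
    have hm1 : m = 1 := le_antisymm (hub1 m hmmem) (hmub 1 h1mem)
    rw [hm1, if_pos (by decide : (((1:Int) == 1) = true))]
    rw [hSlen, hN2z]
    simp

theorem prityjnosc_changed : Claim_changed_prityjnosc := by
  unfold Claim_changed_prityjnosc
  refine ⟨by decide, by decide, ?_, ?_, by decide⟩
  · exact A_nonpos 0 (by decide)
  · exact B_nonpos 0 (by decide)

theorem prityjnosc_tight : Claim_exact_prityjnosc := by
  intro liczba _ hD
  unfold D_prityjnosc at hD
  rw [A_nonpos liczba (by omega), B_nonpos liczba (by omega)]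
  decide
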